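-- pv_equiv track=rewrite | github.com/korpatiy/pyworks | lab1.py | get_classes
-- ===== SOURCE A (Python) =====
-- import operator
--
-- def get_classes(neighbors):
--     class_votes = {}
--     for x in range(len(neighbors)):
--         response = neighbors[x][-1]
--         if response in class_votes:
--             class_votes[response] += 1
--         else:
--             class_votes[response] = 1
--     sorted_votes = sorted(class_votes.items(), key=operator.itemgetter(1), reverse=True)
--     return sorted_votes[0][0]
-- ===== SOURCE B (Python) =====
-- def get_classes(neighbors):
--     labels = [row[-1] for row in neighbors]
--     winner = labels[0]
--     best = labels.count(winner)
--     for lab in labels: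
--         c = labels.count(lab)
--         if best < c:
--             winner, best = lab, c
--     return winner
-- ===== Notes on version B (the rewrite author's own statement) =====
-- stated objective: simpler
-- what changed: B drops the vote dictionary and the descending sort entirely: it extracts the label column once, then finds the winner with a first-strict-max scan using list.count, which preserves A's tie-break (first-inserted label wins) because a strict comparison never lets a later label displace an earlier one with an equal count.
import Mathlib
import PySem

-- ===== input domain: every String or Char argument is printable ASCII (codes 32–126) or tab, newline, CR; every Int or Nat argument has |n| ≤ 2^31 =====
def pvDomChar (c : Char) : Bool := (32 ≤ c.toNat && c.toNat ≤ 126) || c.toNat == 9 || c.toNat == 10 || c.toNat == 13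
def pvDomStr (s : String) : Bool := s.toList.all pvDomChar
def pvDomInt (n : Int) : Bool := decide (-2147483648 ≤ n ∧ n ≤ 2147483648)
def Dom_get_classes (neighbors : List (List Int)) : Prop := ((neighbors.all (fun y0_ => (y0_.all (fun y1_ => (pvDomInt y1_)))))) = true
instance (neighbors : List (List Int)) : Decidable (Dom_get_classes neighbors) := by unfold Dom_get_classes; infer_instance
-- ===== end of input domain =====

-- B drops A's vote dictionary and descending sort: it extracts the label column once and
-- picks the winner with a first-strict-max scan over list.count values (same result, proved equal on Pre_).


-- ===== PORT A =====
def get_classes (neighbors : List (List Int)) : Int :=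
  let class_votes : PySem.Dict Int Int :=
    (PySem.List.pyRange 0 (PySem.List.len neighbors) 1).foldl
      (fun (d : PySem.Dict Int Int) x =>
        let response := PySem.List.pyGetD (PySem.List.pyGetD neighbors x []) (-1) 0
        if d.contains response then d.insert response (d.getD response 0 + 1)
        else d.insert response 1)
      PySem.Dict.empty
  let sorted_votes := PySem.List.sorted class_votes.items (fun p => p.2) true
  (PySem.List.pyGetD sorted_votes 0 ((0 : Int), (0 : Int))).1

-- ===== PORT B =====
def get_classes_alt (neighbors : List (List Int)) : Int :=
  let labels := neighbors.map (fun row => PySem.List.pyGetD row (-1) 0)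
  let winner := PySem.List.pyGetD labels 0 0
  (labels.foldl
      (fun (s : Int × Int) lab =>
        let c : Int := (PySem.List.count labels lab : Int)
        if s.2 < c then (lab, c) else s)
      (winner, (PySem.List.count labels winner : Int))).1

-- ===== PRECONDITION & SPEC =====
-- Pre_ excludes exactly the inputs where A raises: empty neighbors (sorted_votes[0] → IndexError)
-- and any empty row (row[-1] → IndexError).
def Pre_get_classes (neighbors : List (List Int)) : Prop :=
  neighbors ≠ [] ∧ ∀ row ∈ neighbors, row ≠ []
instance (neighbors : List (List Int)) : Decidable (Pre_get_classes neighbors) := by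
  unfold Pre_get_classes; infer_instance
def pvWitness_get_classes : List (List Int) := [[1, 2], [3, 2], [0, 5]]

def Spec_get_classes (neighbors : List (List Int)) (out : Int) : Prop := out = get_classes_alt neighbors
instance (neighbors : List (List Int)) (out : Int) : Decidable (Spec_get_classes neighbors out) := by
  unfold Spec_get_classes; infer_instance

-- ===== CLAIM (what is proved, stated in full; the proofs are below) =====
def Claim_equal_get_classes : Prop := ∀ (neighbors : List (List Int)), Dom_get_classes neighbors → Pre_get_classes neighbors → Spec_get_classes neighbors (get_classes neighbors)

-- ===== LEMMAS AND PROOFS =====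

-- The first-strict-max step both sides reduce to: compare against the count in xs.
def pvStep (xs : List Int) (s : Int × Int) (k : Int) : Int × Int :=
  if s.2 < (List.count k xs : Int) then (k, (List.count k xs : Int)) else s

theorem pvStep_snd_mono (xs : List Int) (s : Int × Int) (k : Int) : s.2 ≤ (pvStep xs s k).2 := by
  unfold pvStep; split_ifs with h
  · exact le_of_lt h
  · exact le_refl _

theorem pvStep_snd_cov (xs : List Int) (s : Int × Int) (k : Int) :
    (List.count k xs : Int) ≤ (pvStep xs s k).2 := by
  unfold pvStep; split_ifs with h
  · exact le_refl _
  · omega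

-- The distinct elements of l not yet in seen, in first-occurrence order (ghost of Set.ofList).
def pvNew : List Int → List Int → List Int
  | _, [] => []
  | seen, x :: t => if seen.contains x then pvNew seen t else x :: pvNew (seen ++ [x]) t

theorem foldl_add_eq_append_pvNew (l : List Int) :
    ∀ seen : List Int, l.foldl PySem.Set.add seen = seen ++ pvNew seen l := by
  induction l with
  | nil => intro seen; simp [pvNew]
  | cons x t ih =>
    intro seen
    by_cases h : seen.contains x
    · simp only [List.foldl_cons, PySem.Set.add, PySem.Set.contains, pvNew, h, if_true]
      exact ih seen
    · simp only [List.foldl_cons, PySem.Set.add, PySem.Set.contains, pvNew, h,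
        Bool.false_eq_true, if_false]
      rw [ih (seen ++ [x])]
      simp

-- Duplicates never fire the strict comparison: the fold over l equals the fold over its new
-- distinct elements, whenever every already-seen label's count is dominated by the state.
theorem foldl_pvStep_pvNew (xs : List Int) (l : List Int) :
    ∀ (seen : List Int) (s : Int × Int), (∀ k ∈ seen, (List.count k xs : Int) ≤ s.2) →
    l.foldl (pvStep xs) s = (pvNew seen l).foldl (pvStep xs) s := by
  induction l with
  | nil => intro seen s _; rfl
  | cons x t ih =>
    intro seen s hinv
    simp only [List.foldl_cons, pvNew]
    by_cases h : seen.contains x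
    · have hx : x ∈ seen := by simpa using h
      have hstep : pvStep xs s x = s := by
        have := hinv x hx
        unfold pvStep
        split_ifs with hlt
        · omega
        · rfl
      simp only [h, if_true, hstep]
      exact ih seen s hinv
    · simp only [h, Bool.false_eq_true, if_false, List.foldl_cons]
      apply ih (seen ++ [x])
      intro k hk
      rcases List.mem_append.1 hk with hk | hk
      · exact le_trans (hinv k hk) (pvStep_snd_mono xs s x)
      · simp at hk
        subst hk
        exact pvStep_snd_cov xs s k

-- max? of a nonempty list is the plain first-max fold.
theorem max?_cons {α : Type} (key : α → Int) (h : α) (t : List α) :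
    PySem.List.max? (h :: t) key =
      some (t.foldl (fun m x => if key m < key x then x else m) h) := by
  suffices haux : ∀ (t : List α) (m : α),
      t.foldl
        (fun acc x =>
          match acc with
          | none => some x
          | some m => if key m < key x then some x else some m)
        (some m) = some (t.foldl (fun m x => if key m < key x then x else m) m) by
    simp only [PySem.List.max?, List.foldl_cons]
    exact haux t h
  intro t
  induction t with
  | nil => intro m; rfl
  | cons x t ih =>
    intro m
    simp only [List.foldl_cons]
    split_ifs with hc
    · exact ih x
    · exact ih m

-- Head of the stable descending sort = first maximal element (Python's max over the same list).
theorem head?_sorted_rev_eq_max? {α : Type} (l : List α) (key : α → Int) :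
    (PySem.List.sorted l key true).head? = PySem.List.max? l key := by
  suffices haux : ∀ (l acc : List α),
      (l.foldl (fun acc x => PySem.List.insertBy (fun a b => decide (key b < key a)) x acc) acc).head? =
        l.foldl
          (fun s x =>
            match s with
            | none => some x
            | some m => if key m < key x then some x else some m)
          acc.head? by
    simpa [PySem.List.sorted, PySem.List.max?] using haux l []
  intro l
  induction l with
  | nil => intro acc; rfl
  | cons x l ih =>
    intro acc
    simp only [List.foldl_cons]
    rw [ih]
    congr 1
    cases acc with
    | nil => rfl
    | cons y ys =>
      simp only [PySem.List.insertBy, List.head?_cons]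
      split_ifs with h <;> simp_all

-- A's counting loop builds exactly Counter(labels).
theorem votes_eq_counter (neighbors : List (List Int)) :
    (PySem.List.pyRange 0 (PySem.List.len neighbors) 1).foldl
      (fun (d : PySem.Dict Int Int) x =>
        if d.contains (PySem.List.pyGetD (PySem.List.pyGetD neighbors x []) (-1) 0) then
          d.insert (PySem.List.pyGetD (PySem.List.pyGetD neighbors x []) (-1) 0)
            (d.getD (PySem.List.pyGetD (PySem.List.pyGetD neighbors x []) (-1) 0) 0 + 1)
        else d.insert (PySem.List.pyGetD (PySem.List.pyGetD neighbors x []) (-1) 0) 1)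
      PySem.Dict.empty =
    PySem.Dict.counter (neighbors.map (fun row => PySem.List.pyGetD row (-1) 0)) := by
  rw [PySem.List.foldl_pyRange_zero_pyGetD neighbors []
      (fun (d : PySem.Dict Int Int) row =>
        if d.contains (PySem.List.pyGetD row (-1) 0) then
          d.insert (PySem.List.pyGetD row (-1) 0) (d.getD (PySem.List.pyGetD row (-1) 0) 0 + 1)
        else d.insert (PySem.List.pyGetD row (-1) 0) 1)
      PySem.Dict.empty]
  have hcongr :
      neighbors.foldl
        (fun (d : PySem.Dict Int Int) row =>
          if d.contains (PySem.List.pyGetD row (-1) 0) then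
            d.insert (PySem.List.pyGetD row (-1) 0) (d.getD (PySem.List.pyGetD row (-1) 0) 0 + 1)
          else d.insert (PySem.List.pyGetD row (-1) 0) 1)
        PySem.Dict.empty =
      neighbors.foldl
        (fun (d : PySem.Dict Int Int) row =>
          d.insert (PySem.List.pyGetD row (-1) 0) (d.getD (PySem.List.pyGetD row (-1) 0) 0 + 1))
        PySem.Dict.empty := by
    apply PySem.List.foldl_congr_mem
    intro d row _
    by_cases h : d.contains (PySem.List.pyGetD row (-1) 0) = true
    · simp [h]
    · simp only [h, Bool.false_eq_true, if_false]
      rw [PySem.Dict.getD_of_not_contains _ _ (by simpa using h)]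
      norm_num
  rw [hcongr, ← PySem.Dict.foldl_insert_getD_add_one_eq_counter, List.foldl_map]

-- Core equality, stated over the decomposed label column.
theorem get_classes_core (x0 : Int) (t : List Int) :
    (PySem.List.pyGetD
        (PySem.List.sorted ((PySem.Dict.counter (x0 :: t)).items) (fun p => p.2) true)
        0 ((0 : Int), (0 : Int))).1 =
    ((x0 :: t).foldl
        (fun (s : Int × Int) lab =>
          let c : Int := (PySem.List.count (x0 :: t) lab : Int)
          if s.2 < c then (lab, c) else s)
        (PySem.List.pyGetD (x0 :: t) 0 0,
         (PySem.List.count (x0 :: t) (PySem.List.pyGetD (x0 :: t) 0 0) : Int))).1 := by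
  have hget0 : PySem.List.pyGetD (x0 :: t) 0 (0 : Int) = x0 := by
    simp [PySem.List.pyGetD_zero]
  have hfun : (fun (s : Int × Int) lab =>
      let c : Int := (PySem.List.count (x0 :: t) lab : Int)
      if s.2 < c then (lab, c) else s) = pvStep (x0 :: t) := rfl
  have hB :
      ((x0 :: t).foldl
        (fun (s : Int × Int) lab =>
          let c : Int := (PySem.List.count (x0 :: t) lab : Int)
          if s.2 < c then (lab, c) else s)
        (PySem.List.pyGetD (x0 :: t) 0 0,
         (PySem.List.count (x0 :: t) (PySem.List.pyGetD (x0 :: t) 0 0) : Int))) =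
      (pvNew [x0] t).foldl (pvStep (x0 :: t)) (x0, (List.count x0 (x0 :: t) : Int)) := by
    rw [hget0, hfun, List.foldl_cons]
    have hself : pvStep (x0 :: t) (x0, (List.count x0 (x0 :: t) : Int)) x0
        = (x0, (List.count x0 (x0 :: t) : Int)) := by
      unfold pvStep; simp
    have hinitc : ((PySem.List.count (x0 :: t) x0 : Nat) : Int)
        = (List.count x0 (x0 :: t) : Int) := rfl
    rw [hinitc, hself]
    exact foldl_pvStep_pvNew (x0 :: t) t [x0] _ (by
      intro k hk; simp only [List.mem_singleton] at hk; subst hk; exact le_refl _)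
  have hitems : (PySem.Dict.counter (x0 :: t)).items
      = (x0 :: pvNew [x0] t).map (fun k => (k, (List.count k (x0 :: t) : Int))) := by
    rw [PySem.Dict.items_counter]
    congr 1
    have h1 : PySem.Set.ofList (x0 :: t) = List.foldl PySem.Set.add [x0] t := by
      simp [PySem.Set.ofList, PySem.Set.add, PySem.Set.contains]
    rw [h1, foldl_add_eq_append_pvNew]
    rfl
  have hmax : PySem.List.max? ((PySem.Dict.counter (x0 :: t)).items) (fun p : Int × Int => p.2)
      = some ((pvNew [x0] t).foldl (pvStep (x0 :: t)) (x0, (List.count x0 (x0 :: t) : Int))) := by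
    rw [hitems, List.map_cons, max?_cons, List.foldl_map]
    congr 1
  rw [hB]
  simp only [PySem.List.pyGetD_zero, List.getD_eq_getElem?_getD, ← List.head?_eq_getElem?]
  rw [head?_sorted_rev_eq_max?, hmax]
  rfl

-- ===== VERDICT (by name: the statement is the Claim_ definition above) =====
theorem get_classes_spec : Claim_equal_get_classes := by
  intro neighbors _ hpre
  obtain ⟨hne, _⟩ := hpre
  show (PySem.List.pyGetD
      (PySem.List.sorted
        ((PySem.List.pyRange 0 (PySem.List.len neighbors) 1).foldl
          (fun (d : PySem.Dict Int Int) x =>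
            if d.contains (PySem.List.pyGetD (PySem.List.pyGetD neighbors x []) (-1) 0) then
              d.insert (PySem.List.pyGetD (PySem.List.pyGetD neighbors x []) (-1) 0)
                (d.getD (PySem.List.pyGetD (PySem.List.pyGetD neighbors x []) (-1) 0) 0 + 1)
            else d.insert (PySem.List.pyGetD (PySem.List.pyGetD neighbors x []) (-1) 0) 1)
          PySem.Dict.empty).items (fun p => p.2) true)
      0 ((0 : Int), (0 : Int))).1 =
    ((neighbors.map (fun row => PySem.List.pyGetD row (-1) 0)).foldl
        (fun (s : Int × Int) lab =>
          let c : Int := (PySem.List.count (neighbors.map (fun row => PySem.List.pyGetD row (-1) 0)) lab : Int)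
          if s.2 < c then (lab, c) else s)
        (PySem.List.pyGetD (neighbors.map (fun row => PySem.List.pyGetD row (-1) 0)) 0 0,
         (PySem.List.count (neighbors.map (fun row => PySem.List.pyGetD row (-1) 0))
            (PySem.List.pyGetD (neighbors.map (fun row => PySem.List.pyGetD row (-1) 0)) 0 0) : Int))).1
  rw [votes_eq_counter]
  cases hn : neighbors with
  | nil => exact absurd hn hne
  | cons r rs =>
    simp only [List.map_cons]
    exact get_classes_core _ _
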